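-- pv_equiv track=rewrite | github.com/alexwoolford/flight-schedule | tests/test_environment_scenarios.py | _validate_credential_strength
-- ===== SOURCE A (Python) =====
-- def _validate_credential_strength(cred_type: str, value: str) -> bool:
--     """Helper method to validate credential strength"""
--     if not value:
--         return False
--
--     if cred_type == "password":
--         # Password should be complex
--         has_upper = any(c.isupper() for c in value)
--         has_lower = any(c.islower() for c in value)
--         has_digit = any(c.isdigit() for c in value)
--         has_special = any(c in "!@#$%^&*()_+-=" for c in value)
--         is_long_enough = len(value) >= 8
--
--         return (
--             has_upper and has_lower and has_digit and has_special and is_long_enough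
--         )
--
--     elif cred_type in ["api_key", "token", "secret"]:
--         # API keys, tokens, and secrets should be reasonably long and complex
--         return len(value) >= 16 and not value.isalpha()
--
--     return True
-- ===== SOURCE B (Python) =====
-- _UPPER = "ABCDEFGHIJKLMNOPQRSTUVWXYZ"
-- _LOWER = "abcdefghijklmnopqrstuvwxyz"
-- _DIGITS = "0123456789"
-- _SPECIAL = "!@#$%^&*()_+-="
--
--
-- def _char_class(c):
--     if c in _UPPER:
--         return 1
--     if c in _LOWER:
--         return 2
--     if c in _DIGITS:
--         return 4
--     if c in _SPECIAL:
--         return 8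
--     return 0
--
--
-- def _validate_credential_strength(cred_type: str, value: str) -> bool:
--     if not value:
--         return False
--
--     if cred_type == "password":
--         seen = 0
--         for c in value:
--             seen |= _char_class(c)
--             if seen == 15:
--                 break
--         return seen == 15 and len(value) >= 8
--
--     if cred_type in ("api_key", "token", "secret"):
--         return len(value) >= 16 and not value.isalpha()
--
--     return True
-- ===== Notes on version B (the rewrite author's own statement) =====
-- stated objective: alternative
-- what changed: The password branch's four any(...) predicate scans are replaced by a table-driven bitmask classification: each character is mapped to a class mask (1/2/4/8) by explicit-alphabet membership, the masks are OR-accumulated in one early-exiting pass, and validity is mask == 15.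
import Mathlib
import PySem

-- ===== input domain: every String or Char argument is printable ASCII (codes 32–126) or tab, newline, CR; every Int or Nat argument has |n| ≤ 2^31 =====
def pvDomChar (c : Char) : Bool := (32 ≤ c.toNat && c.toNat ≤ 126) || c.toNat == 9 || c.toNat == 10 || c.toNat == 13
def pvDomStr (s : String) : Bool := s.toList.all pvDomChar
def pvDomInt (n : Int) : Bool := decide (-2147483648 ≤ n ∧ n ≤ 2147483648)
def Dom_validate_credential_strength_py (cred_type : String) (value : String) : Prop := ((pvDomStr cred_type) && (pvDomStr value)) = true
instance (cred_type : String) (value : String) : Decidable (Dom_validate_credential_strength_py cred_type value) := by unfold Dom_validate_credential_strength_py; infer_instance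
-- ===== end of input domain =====

-- B replaces the password branch's four any(...) predicate scans by a table-driven bitmask classification:
-- each character is mapped to a class mask (1/2/4/8) by explicit-alphabet membership, OR-accumulated in one
-- early-exiting pass, and validity is mask = 15 (alternative decomposition, same asymptotic cost).


-- ===== PORT A =====
def validate_credential_strength_py (cred_type : String) (value : String) : Bool :=
  if value = "" then false
  else if cred_type = "password" then
    let cs := value.toList
    let has_upper := cs.any PySem.Chars.isupper
    let has_lower := cs.any PySem.Chars.islower
    let has_digit := cs.any PySem.Chars.isdigit
    let has_special := cs.any (fun c => ("!@#$%^&*()_+-=".toList).contains c)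
    let is_long_enough := decide (8 ≤ PySem.Str.len value)
    has_upper && has_lower && has_digit && has_special && is_long_enough
  else if cred_type = "api_key" ∨ cred_type = "token" ∨ cred_type = "secret" then
    decide (16 ≤ PySem.Str.len value) && !(PySem.Str.strIsalpha value)
  else true

-- ===== PORT B =====
-- _char_class: explicit-alphabet membership gives each character a class bitmask
def pvCharClass (c : Char) : Nat :=
  if ("ABCDEFGHIJKLMNOPQRSTUVWXYZ".toList).contains c then 1
  else if ("abcdefghijklmnopqrstuvwxyz".toList).contains c then 2
  else if ("0123456789".toList).contains c then 4
  else if ("!@#$%^&*()_+-=".toList).contains c then 8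
  else 0

-- the early-exiting OR-accumulation loop over the password's characters
def pvScan : List Char → Nat → Nat
  | [], seen => seen
  | c :: cs, seen =>
    let seen' := seen ||| pvCharClass c
    if seen' = 15 then seen' else pvScan cs seen'

def validate_credential_strength_py_alt (cred_type : String) (value : String) : Bool :=
  if value = "" then false
  else if cred_type = "password" then
    decide (pvScan value.toList 0 = 15) && decide (8 ≤ PySem.Str.len value)
  else if cred_type = "api_key" ∨ cred_type = "token" ∨ cred_type = "secret" then
    decide (16 ≤ PySem.Str.len value) && !(PySem.Str.strIsalpha value)
  else true

-- ===== PRECONDITION & SPEC =====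
def Spec_validate_credential_strength_py (cred_type : String) (value : String) (out : Bool) : Prop := out = validate_credential_strength_py_alt cred_type value
instance (cred_type : String) (value : String) (out : Bool) : Decidable (Spec_validate_credential_strength_py cred_type value out) := by unfold Spec_validate_credential_strength_py; infer_instance

-- ===== CLAIM (what is proved, stated in full; the proofs are below) =====
def Claim_equal_validate_credential_strength_py : Prop := ∀ (cred_type : String) (value : String), Dom_validate_credential_strength_py cred_type value → Spec_validate_credential_strength_py cred_type value (validate_credential_strength_py cred_type value)

-- ===== LEMMAS AND PROOFS =====

theorem pv_upper_list : "ABCDEFGHIJKLMNOPQRSTUVWXYZ".toList = ['A','B','C','D','E','F','G','H','I','J','K','L','M','N','O','P','Q','R','S','T','U','V','W','X','Y','Z'] := by decide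
theorem pv_lower_list : "abcdefghijklmnopqrstuvwxyz".toList = ['a','b','c','d','e','f','g','h','i','j','k','l','m','n','o','p','q','r','s','t','u','v','w','x','y','z'] := by decide
theorem pv_digit_list : "0123456789".toList = ['0','1','2','3','4','5','6','7','8','9'] := by decide
theorem pv_special_list : "!@#$%^&*()_+-=".toList = ['!','@','#','$','%','^','&','*','(',')','_','+','-','='] := by decide

theorem pv_upperN (c : Char) : (("ABCDEFGHIJKLMNOPQRSTUVWXYZ".toList).contains c = true) ↔ (65 ≤ c.toNat ∧ c.toNat ≤ 90) := by
  simp [pv_upper_list, List.contains_eq_mem, Char.ext_iff, UInt32.ext_iff]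
  omega

theorem pv_lowerN (c : Char) : (("abcdefghijklmnopqrstuvwxyz".toList).contains c = true) ↔ (97 ≤ c.toNat ∧ c.toNat ≤ 122) := by
  simp [pv_lower_list, List.contains_eq_mem, Char.ext_iff, UInt32.ext_iff]
  omega

theorem pv_digitN (c : Char) : (("0123456789".toList).contains c = true) ↔ (48 ≤ c.toNat ∧ c.toNat ≤ 57) := by
  simp [pv_digit_list, List.contains_eq_mem, Char.ext_iff, UInt32.ext_iff]
  omega

theorem pv_specialN (c : Char) : (("!@#$%^&*()_+-=".toList).contains c = true) ↔
    (c.toNat = 33 ∨ c.toNat = 64 ∨ c.toNat = 35 ∨ c.toNat = 36 ∨ c.toNat = 37 ∨ c.toNat = 94 ∨ c.toNat = 38 ∨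
     c.toNat = 42 ∨ c.toNat = 40 ∨ c.toNat = 41 ∨ c.toNat = 95 ∨ c.toNat = 43 ∨ c.toNat = 45 ∨ c.toNat = 61) := by
  simp [pv_special_list, List.contains_eq_mem, Char.ext_iff, UInt32.ext_iff]

theorem pv_contains_upper (c : Char) : (("ABCDEFGHIJKLMNOPQRSTUVWXYZ".toList).contains c) = PySem.Chars.isupper c := by
  simp only [PySem.Chars.isupper]
  rw [Bool.eq_iff_iff, pv_upperN]
  simp [Char.le_def, UInt32.le_iff_toNat_le]

theorem pv_contains_lower (c : Char) : (("abcdefghijklmnopqrstuvwxyz".toList).contains c) = PySem.Chars.islower c := by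
  simp only [PySem.Chars.islower]
  rw [Bool.eq_iff_iff, pv_lowerN]
  simp [Char.le_def, UInt32.le_iff_toNat_le]

theorem pv_contains_digit (c : Char) : (("0123456789".toList).contains c) = PySem.Chars.isdigit c := by
  simp only [PySem.Chars.isdigit]
  rw [Bool.eq_iff_iff, pv_digitN]
  simp [Char.le_def, UInt32.le_iff_toNat_le]

-- per-bit reading of the class mask
theorem pv_tb0 (c : Char) : (pvCharClass c).testBit 0 = ("ABCDEFGHIJKLMNOPQRSTUVWXYZ".toList).contains c := by
  unfold pvCharClass
  split_ifs with h1 h2 h3 h4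
  · rw [h1]; decide
  · rw [Bool.not_eq_true] at h1; rw [h1]; decide
  · rw [Bool.not_eq_true] at h1; rw [h1]; decide
  · rw [Bool.not_eq_true] at h1; rw [h1]; decide
  · rw [Bool.not_eq_true] at h1; rw [h1]; decide

theorem pv_tb1 (c : Char) : (pvCharClass c).testBit 1 = ("abcdefghijklmnopqrstuvwxyz".toList).contains c := by
  unfold pvCharClass
  split_ifs with h1 h2 h3 h4
  · have hl : ("abcdefghijklmnopqrstuvwxyz".toList).contains c = false := by
      rw [← Bool.not_eq_true, pv_lowerN]
      have := (pv_upperN c).mp h1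
      omega
    rw [hl]; decide
  · rw [h2]; decide
  · rw [Bool.not_eq_true] at h2; rw [h2]; decide
  · rw [Bool.not_eq_true] at h2; rw [h2]; decide
  · rw [Bool.not_eq_true] at h2; rw [h2]; decide

theorem pv_tb2 (c : Char) : (pvCharClass c).testBit 2 = ("0123456789".toList).contains c := by
  unfold pvCharClass
  split_ifs with h1 h2 h3 h4
  · have hd : ("0123456789".toList).contains c = false := by
      rw [← Bool.not_eq_true, pv_digitN]
      have := (pv_upperN c).mp h1
      omega
    rw [hd]; decide
  · have hd : ("0123456789".toList).contains c = false := by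
      rw [← Bool.not_eq_true, pv_digitN]
      have := (pv_lowerN c).mp h2
      omega
    rw [hd]; decide
  · rw [h3]; decide
  · rw [Bool.not_eq_true] at h3; rw [h3]; decide
  · rw [Bool.not_eq_true] at h3; rw [h3]; decide

theorem pv_tb3 (c : Char) : (pvCharClass c).testBit 3 = ("!@#$%^&*()_+-=".toList).contains c := by
  unfold pvCharClass
  split_ifs with h1 h2 h3 h4
  · have hs : ("!@#$%^&*()_+-=".toList).contains c = false := by
      rw [← Bool.not_eq_true, pv_specialN]
      have := (pv_upperN c).mp h1
      omega
    rw [hs]; decide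
  · have hs : ("!@#$%^&*()_+-=".toList).contains c = false := by
      rw [← Bool.not_eq_true, pv_specialN]
      have := (pv_lowerN c).mp h2
      omega
    rw [hs]; decide
  · have hs : ("!@#$%^&*()_+-=".toList).contains c = false := by
      rw [← Bool.not_eq_true, pv_specialN]
      have := (pv_digitN c).mp h3
      omega
    rw [hs]; decide
  · rw [h4]; decide
  · rw [Bool.not_eq_true] at h4; rw [h4]; decide

theorem pv_charClass_lt (c : Char) : pvCharClass c < 16 := by
  unfold pvCharClass
  split_ifs <;> omega

theorem pv_or15 (m : Nat) (h : m < 16) : 15 ||| m = 15 := by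
  interval_cases m <;> decide

theorem pv_foldl_from_15 (cs : List Char) : cs.foldl (fun a c => a ||| pvCharClass c) 15 = 15 := by
  induction cs with
  | nil => rfl
  | cons c cs ih => simpa [List.foldl, pv_or15 _ (pv_charClass_lt c)] using ih

theorem pv_scan_eq (cs : List Char) (seen : Nat) :
    pvScan cs seen = cs.foldl (fun a c => a ||| pvCharClass c) seen := by
  induction cs generalizing seen with
  | nil => rfl
  | cons c cs ih =>
    simp only [pvScan, List.foldl]
    by_cases h : seen ||| pvCharClass c = 15
    · simp [h, pv_foldl_from_15]
    · simp [h, ih]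

theorem pv_foldl_lt (cs : List Char) (seen : Nat) (h : seen < 16) :
    cs.foldl (fun a c => a ||| pvCharClass c) seen < 16 := by
  induction cs generalizing seen with
  | nil => simpa using h
  | cons c cs ih =>
    refine ih _ ?_
    have h2 := pv_charClass_lt c
    exact Nat.or_lt_two_pow (n := 4) h h2

theorem pv_foldl_testBit (cs : List Char) (seen : Nat) (i : Nat) :
    (cs.foldl (fun a c => a ||| pvCharClass c) seen).testBit i =
      (seen.testBit i || cs.any (fun c => (pvCharClass c).testBit i)) := by
  induction cs generalizing seen with
  | nil => simp
  | cons c cs ih => simp [List.foldl, ih, Nat.testBit_or, Bool.or_assoc]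

theorem pv_eq15_iff (x : Nat) (h : x < 16) :
    x = 15 ↔ (x.testBit 0 = true ∧ x.testBit 1 = true ∧ x.testBit 2 = true ∧ x.testBit 3 = true) := by
  interval_cases x <;> decide

theorem pv_scan_iff (cs : List Char) :
    (pvScan cs 0 = 15) ↔
      (cs.any PySem.Chars.isupper = true ∧ cs.any PySem.Chars.islower = true ∧
       cs.any PySem.Chars.isdigit = true ∧ cs.any (fun c => ("!@#$%^&*()_+-=".toList).contains c) = true) := by
  rw [pv_scan_eq, pv_eq15_iff _ (pv_foldl_lt cs 0 (by omega))]
  simp only [pv_foldl_testBit, Nat.zero_testBit, Bool.false_or,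
    pv_tb0, pv_tb1, pv_tb2, pv_tb3, pv_contains_upper, pv_contains_lower, pv_contains_digit]

theorem pv_scan_bool (cs : List Char) :
    decide (pvScan cs 0 = 15) =
      (cs.any PySem.Chars.isupper && cs.any PySem.Chars.islower && cs.any PySem.Chars.isdigit &&
       cs.any (fun c => ("!@#$%^&*()_+-=".toList).contains c)) := by
  rw [Bool.eq_iff_iff]
  simp only [decide_eq_true_eq, Bool.and_eq_true, pv_scan_iff]
  tauto

-- ===== VERDICT (by name: the statement is the Claim_ definition above) =====
theorem validate_credential_strength_py_spec : Claim_equal_validate_credential_strength_py := by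
  intro cred_type value _
  unfold Spec_validate_credential_strength_py
  unfold validate_credential_strength_py validate_credential_strength_py_alt
  by_cases hv : value = ""
  · rw [if_pos hv, if_pos hv]
  · rw [if_neg hv, if_neg hv]
    by_cases hp : cred_type = "password"
    · rw [if_pos hp, if_pos hp]
      simp only [pv_scan_bool]
    · rw [if_neg hp, if_neg hp]
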